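-- pv_equiv track=rewrite | github.com/Skalis07/TrufaDocs | editor/structure.py | _build_core_order_from_detected
-- ===== SOURCE A (Python) =====
-- from typing import Dict, List, Tuple, Optional, Any
--
-- def _build_core_order_from_detected(
--     detected_order: List[str],
--     extra_sections: List[Dict],
-- ) -> str:
--     """Construye core_order preservando el orden detectado en import.
--
--     - Mantiene módulos core en el orden observado (experience/education/skills).
--     - Inserta extras (`extra-*`) en su posición observada.
--     - Completa módulos faltantes al final para mantener compatibilidad.
--     """
--     default_core = ["experience", "education", "skills"]
--     extra_ids = [
--         (section.get("section_id") or "").strip()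
--         for section in (extra_sections or [])
--         if (section.get("section_id") or "").strip()
--     ]
--     known_ids = set(default_core + extra_ids)
--
--     ordered: List[str] = []
--     seen: set[str] = set()
--
--     for token in detected_order or []:
--         module_id = (token or "").strip()
--         if not module_id:
--             continue
--         if module_id not in known_ids:
--             continue
--         if module_id in seen:
--             continue
--         ordered.append(module_id)
--         seen.add(module_id)
--
--     for module_id in default_core:
--         if module_id not in seen:
--             ordered.append(module_id)
--             seen.add(module_id)
--
--     for extra_id in extra_ids:
--         if extra_id not in seen:
--             ordered.append(extra_id)
--             seen.add(extra_id)
--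
--     return ",".join(ordered) if ordered else ",".join(default_core)
-- ===== SOURCE B (Python) =====
-- from typing import Dict, List
--
--
-- def _build_core_order_from_detected(
--     detected_order: List[str],
--     extra_sections: List[Dict],
-- ) -> str:
--     default_core = ["experience", "education", "skills"]
--     extra_ids = [
--         s
--         for s in ((sec.get("section_id") or "").strip() for sec in (extra_sections or []))
--         if s
--     ]
--     pool = default_core + extra_ids
--     # distinct known ids, first occurrence first (prefix-membership filter, no seen set)
--     uniq = [x for i, x in enumerate(pool) if x not in pool[:i]]
--     cleaned = [t for t in ((tok or "").strip() for tok in (detected_order or [])) if t and t in pool]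
--     big = len(cleaned)
--
--     def rank(u):
--         try:
--             return cleaned.index(u)
--         except ValueError:
--             return big + uniq.index(u)
--
--     return ",".join(sorted(uniq, key=rank))
-- ===== Notes on version B (the rewrite author's own statement) =====
-- stated objective: alternative
-- what changed: Replaces A's three sequential append-if-unseen loops over an (ordered, seen-set) pair (plus a dead empty-result fallback) by a rank-and-sort algorithm: compute the distinct known ids once, assign each a numeric rank (index of its first occurrence among the cleaned detected tokens, else len(cleaned) plus its position in the id pool) and return the ids stably sorted by that rank.
import Mathlib
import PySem

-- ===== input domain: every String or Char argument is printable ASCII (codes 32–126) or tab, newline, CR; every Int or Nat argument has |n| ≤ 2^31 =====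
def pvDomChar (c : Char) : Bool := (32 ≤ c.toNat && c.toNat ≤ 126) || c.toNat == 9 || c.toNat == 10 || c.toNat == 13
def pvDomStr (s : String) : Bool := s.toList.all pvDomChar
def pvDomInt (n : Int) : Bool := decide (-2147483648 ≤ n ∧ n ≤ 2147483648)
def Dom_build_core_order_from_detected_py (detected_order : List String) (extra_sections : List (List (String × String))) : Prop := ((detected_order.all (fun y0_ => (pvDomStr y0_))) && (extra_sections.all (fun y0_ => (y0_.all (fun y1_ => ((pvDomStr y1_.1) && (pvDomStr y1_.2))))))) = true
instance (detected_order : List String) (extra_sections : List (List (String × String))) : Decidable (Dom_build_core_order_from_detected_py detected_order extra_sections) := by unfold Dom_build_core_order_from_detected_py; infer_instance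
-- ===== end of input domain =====

-- B replaces A's three sequential append-if-unseen loops over a (list, seen-set) pair (and their
-- dead empty-result fallback) by a rank-and-sort algorithm: the distinct known ids are assigned a
-- numeric rank (position of first detected occurrence, else past-the-end position in the id pool)
-- and stably sorted by it; objective: alternative (same asymptotics, different algorithm).

-- ===== PORT A =====
def build_core_order_from_detected_py (detected_order : List String) (extra_sections : List (List (String × String))) : String :=
  let default_core : List String := ["experience", "education", "skills"]
  let extra_ids : List String :=
    (extra_sections.map
        (fun s => PySem.Str.strip (((PySem.Dict.mk s).get? "section_id").getD ""))).filter
      (fun v => !(v == ""))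
  let known_ids : PySem.Set String := PySem.Set.ofList (default_core ++ extra_ids)
  let st1 := detected_order.foldl
    (fun (acc : List String × PySem.Set String) token =>
      let module_id := PySem.Str.strip token
      if module_id == "" then acc
      else if !(PySem.Set.contains known_ids module_id) then acc
      else if PySem.Set.contains acc.2 module_id then acc
      else (acc.1 ++ [module_id], PySem.Set.add acc.2 module_id))
    ([], PySem.Set.empty)
  let st2 := default_core.foldl
    (fun (acc : List String × PySem.Set String) module_id =>
      if PySem.Set.contains acc.2 module_id then acc
      else (acc.1 ++ [module_id], PySem.Set.add acc.2 module_id)) st1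
  let st3 := extra_ids.foldl
    (fun (acc : List String × PySem.Set String) extra_id =>
      if PySem.Set.contains acc.2 extra_id then acc
      else (acc.1 ++ [extra_id], PySem.Set.add acc.2 extra_id)) st2
  if st3.1 ≠ [] then PySem.Str.join "," st3.1 else PySem.Str.join "," default_core

-- ===== PORT B =====
def build_core_order_from_detected_py_alt (detected_order : List String) (extra_sections : List (List (String × String))) : String :=
  let default_core : List String := ["experience", "education", "skills"]
  let extra_ids : List String :=
    (extra_sections.map
        (fun s => PySem.Str.strip (((PySem.Dict.mk s).get? "section_id").getD ""))).filter
      (fun v => !(v == ""))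
  let pool : List String := default_core ++ extra_ids
  -- [x for i, x in enumerate(pool) if x not in pool[:i]]  (i ≥ 0, so pool[:i] is exactly `take i`)
  let uniq : List String :=
    ((PySem.List.enumerate pool).filter
        (fun p => !((pool.take p.1.toNat).contains p.2))).map Prod.snd
  let cleaned : List String :=
    (detected_order.map PySem.Str.strip).filter (fun t => !(t == "") && pool.contains t)
  let big := cleaned.length
  let rank : String → Nat := fun u =>
    match PySem.List.index? cleaned u with
    | some i => i
    | none => big + (PySem.List.index? uniq u).getD 0  -- uniq.index(u): u ∈ uniq at every call site
  PySem.Str.join "," (PySem.List.sorted uniq rank)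

-- ===== PRECONDITION & SPEC =====
def Spec_build_core_order_from_detected_py (detected_order : List String) (extra_sections : List (List (String × String))) (out : String) : Prop := out = build_core_order_from_detected_py_alt detected_order extra_sections
instance (detected_order : List String) (extra_sections : List (List (String × String))) (out : String) : Decidable (Spec_build_core_order_from_detected_py detected_order extra_sections out) := by unfold Spec_build_core_order_from_detected_py; infer_instance

-- ===== CLAIM (what is proved, stated in full; the proofs are below) =====
def Claim_equal_build_core_order_from_detected_py : Prop := ∀ (detected_order : List String) (extra_sections : List (List (String × String))), Dom_build_core_order_from_detected_py detected_order extra_sections → Spec_build_core_order_from_detected_py detected_order extra_sections (build_core_order_from_detected_py detected_order extra_sections)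

-- ===== LEMMAS AND PROOFS =====

-- The elements of `l` that are not in `seen`, first occurrences only, in order.
def pvNewOnes : List String → List String → List String
  | [], _ => []
  | x :: t, seen => if x ∈ seen then pvNewOnes t seen else x :: pvNewOnes t (seen ++ [x])

theorem pvNewOnes_congr (l : List String) (s₁ s₂ : List String)
    (h : ∀ y, y ∈ s₁ ↔ y ∈ s₂) : pvNewOnes l s₁ = pvNewOnes l s₂ := by
  induction l generalizing s₁ s₂ with
  | nil => rfl
  | cons x t ih =>
      by_cases hx : x ∈ s₁
      · simp only [pvNewOnes, if_pos hx, if_pos ((h x).mp hx)]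
        exact ih s₁ s₂ h
      · simp only [pvNewOnes, if_neg hx, if_neg (fun hc => hx ((h x).mpr hc))]
        exact congrArg (x :: ·) (ih _ _ (fun y => by simp [h y]))

theorem pvFoldl_add (l s : List String) :
    l.foldl PySem.Set.add s = s ++ pvNewOnes l s := by
  induction l generalizing s with
  | nil => simp [pvNewOnes]
  | cons x t ih =>
      by_cases hx : x ∈ s
      · simp only [pvNewOnes, if_pos hx, List.foldl_cons]
        have : PySem.Set.add s x = s := by
          simp [PySem.Set.add, PySem.Set.contains, hx]
        rw [this, ih]
      · simp only [pvNewOnes, if_neg hx, List.foldl_cons]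
        have : PySem.Set.add s x = s ++ [x] := by
          simp [PySem.Set.add, PySem.Set.contains, hx]
        rw [this, ih, List.append_assoc]
        rfl

theorem pvOfList_eq_newOnes (l : List String) :
    PySem.Set.ofList l = pvNewOnes l [] := by
  rw [PySem.Set.ofList_eq_foldl, pvFoldl_add]
  rfl

theorem pvMem_newOnes (l s : List String) (a : String) (h : a ∈ pvNewOnes l s) :
    a ∈ l ∧ a ∉ s := by
  induction l generalizing s with
  | nil => simp [pvNewOnes] at h
  | cons x t ih =>
      by_cases hx : x ∈ s
      · rw [pvNewOnes, if_pos hx] at h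
        rcases ih s h with ⟨h1, h2⟩
        exact ⟨List.mem_cons_of_mem _ h1, h2⟩
      · rw [pvNewOnes, if_neg hx] at h
        rcases List.mem_cons.mp h with rfl | h'
        · exact ⟨List.mem_cons_self, hx⟩
        · rcases ih _ h' with ⟨h1, h2⟩
          exact ⟨List.mem_cons_of_mem _ h1, fun hs => h2 (List.mem_append_left _ hs)⟩

-- first-occurrence order: pvNewOnes lists elements in increasing order of their index in `l`
theorem pvNewOnes_pairwise_idxOf (l : List String) (s : List String) :
    (pvNewOnes l s).Pairwise (fun a b => l.idxOf a < l.idxOf b) := by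
  induction l generalizing s with
  | nil => simp [pvNewOnes]
  | cons x t ih =>
      by_cases hx : x ∈ s
      · rw [pvNewOnes, if_pos hx]
        refine (ih s).imp_of_mem ?_
        intro a b ha hb hlt
        have hane : a ≠ x := fun he => (pvMem_newOnes t s a ha).2 (he ▸ hx)
        have hbne : b ≠ x := fun he => (pvMem_newOnes t s b hb).2 (he ▸ hx)
        rw [List.idxOf_cons_ne t hane.symm, List.idxOf_cons_ne t hbne.symm]
        omega
      · rw [pvNewOnes, if_neg hx]
        refine List.Pairwise.cons ?_ ?_
        · intro b hb
          have hbne : b ≠ x := fun he =>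
            (pvMem_newOnes t _ b hb).2 (he ▸ List.mem_append_right _ List.mem_cons_self)
          rw [List.idxOf_cons_self, List.idxOf_cons_ne t hbne.symm]
          omega
        · refine (ih _).imp_of_mem ?_
          intro a b ha hb hlt
          have hane : a ≠ x := fun he =>
            (pvMem_newOnes t _ a ha).2 (he ▸ List.mem_append_right _ List.mem_cons_self)
          have hbne : b ≠ x := fun he =>
            (pvMem_newOnes t _ b hb).2 (he ▸ List.mem_append_right _ List.mem_cons_self)
          rw [List.idxOf_cons_ne t hane.symm, List.idxOf_cons_ne t hbne.symm]
          omega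

theorem pvNewOnes_filter (l s : List String) :
    pvNewOnes l s = (pvNewOnes l []).filter (fun x => !(s.contains x)) := by
  induction l generalizing s with
  | nil => rfl
  | cons x t ih =>
      have hx0 : (x : String) ∉ ([] : List String) := List.not_mem_nil
      conv_rhs => rw [pvNewOnes, if_neg hx0]
      by_cases hx : x ∈ s
      · rw [pvNewOnes, if_pos hx]
        rw [List.filter_cons_of_neg (by simp [List.contains_eq_mem, hx]),
          ih ([] ++ [x]), List.filter_filter, ih s]
        refine List.filter_congr ?_
        intro y _
        by_cases hyx : y = x
        · subst hyx; simp [List.contains_eq_mem, hx]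
        · simp [List.contains_eq_mem, hyx]
      · rw [pvNewOnes, if_neg hx]
        rw [List.filter_cons_of_pos (by simp [List.contains_eq_mem, hx]),
          ih ([] ++ [x]), List.filter_filter, ih (s ++ [x])]
        refine congrArg (x :: ·) (List.filter_congr ?_)
        intro y _
        by_cases hyx : y = x
        · subst hyx; simp [List.contains_eq_mem]
        · simp [List.contains_eq_mem, hyx]

-- B's comprehension `[x for i, x in enumerate(pool) if x not in pool[:i]]`
theorem pvEnumFilter (l pre : List String) :
    (((PySem.List.enumerate l (pre.length : Int)).filter
        (fun p => !(((pre ++ l).take p.1.toNat).contains p.2))).map Prod.snd)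
      = pvNewOnes l pre := by
  induction l generalizing pre with
  | nil => rfl
  | cons x t ih =>
      rw [PySem.List.enumerate_cons]
      have htail : ((pre.length : Int) + 1) = (((pre ++ [x]).length : Int)) := by
        simp
      have hlist : pre ++ x :: t = (pre ++ [x]) ++ t := List.append_cons pre x t
      by_cases hx : x ∈ pre
      · rw [List.filter_cons_of_neg (by simp [List.contains_eq_mem, hx]),
          htail, hlist, ih (pre ++ [x])]
        rw [pvNewOnes, if_pos hx]
        exact pvNewOnes_congr t _ _ (fun y => by
          constructor
          · intro h
            rcases List.mem_append.mp h with h | h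
            · exact h
            · rw [List.mem_singleton] at h; exact h ▸ hx
          · exact fun h => List.mem_append_left _ h)
      · rw [List.filter_cons_of_pos (by simp [List.contains_eq_mem, hx]),
          List.map_cons, htail, hlist, ih (pre ++ [x])]
        rw [pvNewOnes, if_neg hx]

theorem pvIdxOf?_of_mem (l : List String) (a : String) (h : a ∈ l) :
    List.idxOf? a l = some (l.idxOf a) := by
  rw [List.idxOf_eq_getD_idxOf?]
  cases hx : List.idxOf? a l with
  | none => exact absurd (List.idxOf?_eq_none_iff.mp hx) (by simp [h])
  | some k => simp

theorem pvPairwise_idxOf_self (l : List String) (h : l.Nodup) :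
    l.Pairwise (fun a b => l.idxOf a < l.idxOf b) := by
  rw [List.pairwise_iff_getElem]
  intro i j hi hj hij
  rw [h.idxOf_getElem i hi, h.idxOf_getElem j hj]
  exact hij

-- On a diagonal state the "append if unseen" step is Set.add on both components.
theorem pvFold_diag (L : List String) (s : List String) :
    L.foldl (fun (acc : List String × PySem.Set String) m =>
        if PySem.Set.contains acc.2 m then acc
        else (acc.1 ++ [m], PySem.Set.add acc.2 m)) (s, s)
      = (L.foldl PySem.Set.add s, L.foldl PySem.Set.add s) := by
  induction L generalizing s with
  | nil => rfl
  | cons x t ih =>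
      have hx : (if PySem.Set.contains s x then (s, s)
            else (s ++ [x], PySem.Set.add s x)) = ((PySem.Set.add s x : List String), PySem.Set.add s x) := by
        by_cases h : x ∈ s
        · simp [PySem.Set.contains, h]
        · simp [PySem.Set.contains, h]
      simp only [List.foldl_cons, hx]
      exact ih (PySem.Set.add s x)

theorem build_core_order_from_detected_py_eq (detected_order : List String) (extra_sections : List (List (String × String))) :
    build_core_order_from_detected_py detected_order extra_sections
      = build_core_order_from_detected_py_alt detected_order extra_sections := by
  unfold build_core_order_from_detected_py build_core_order_from_detected_py_alt
  simp only []
  set extra_ids : List String :=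
    (extra_sections.map
        (fun s => PySem.Str.strip (((PySem.Dict.mk s).get? "section_id").getD ""))).filter
      (fun v => !(v == "")) with hx
  set pool : List String := ["experience", "education", "skills"] ++ extra_ids with hpool
  set C : List String :=
    (detected_order.map PySem.Str.strip).filter (fun t => !(t == "") && pool.contains t) with hC
  -- == A's side: the three guarded folds compute dedup (C ++ pool), which is nonempty ==
  have h1 : detected_order.foldl
      (fun (acc : List String × PySem.Set String) token =>
        let module_id := PySem.Str.strip token
        if module_id == "" then acc
        else if !(PySem.Set.contains (PySem.Set.ofList pool) module_id) then acc
        else if PySem.Set.contains acc.2 module_id then acc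
        else (acc.1 ++ [module_id], PySem.Set.add acc.2 module_id))
      ([], PySem.Set.empty)
    = C.foldl
        (fun (acc : List String × PySem.Set String) m =>
          if PySem.Set.contains acc.2 m then acc
          else (acc.1 ++ [m], PySem.Set.add acc.2 m)) ([], PySem.Set.empty) := by
    rw [hC]
    conv_rhs => rw [← PySem.List.foldl_if_eq_foldl_filter, List.foldl_map]
    refine PySem.List.foldl_congr_mem' _ _ _ _ ?_
    intro t _ acc
    have hk : PySem.Set.contains (PySem.Set.ofList pool) (PySem.Str.strip t)
        = pool.contains (PySem.Str.strip t) := by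
      by_cases hm : PySem.Str.strip t ∈ pool
      · simp [PySem.Set.contains, List.contains_eq_mem, hm, (PySem.Set.mem_ofList pool _).mpr hm]
      · simp [PySem.Set.contains, List.contains_eq_mem, hm,
          (PySem.Set.mem_ofList pool (PySem.Str.strip t)).not.mpr hm]
    by_cases h1 : PySem.Str.strip t = "" <;>
      by_cases h2 : pool.contains (PySem.Str.strip t) <;>
        simp_all
  rw [h1, ← List.foldl_append, ← List.foldl_append]
  have hd := pvFold_diag (C ++ (["experience", "education", "skills"] ++ extra_ids)) []
  rw [show (([], PySem.Set.empty) : List String × PySem.Set String)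
      = (([] : List String), ([] : List String)) from rfl, hd]
  rw [← PySem.Set.ofList_eq_foldl]
  have hmem : "experience" ∈ PySem.Set.ofList (C ++ (["experience", "education", "skills"] ++ extra_ids)) := by
    rw [PySem.Set.mem_ofList]; simp
  rw [if_pos (List.ne_nil_of_mem hmem)]
  rw [← hpool]
  -- == B's side ==
  set U : List String :=
    ((PySem.List.enumerate pool).filter
        (fun p => !((pool.take p.1.toNat).contains p.2))).map Prod.snd with hU
  have hUeq : U = PySem.Set.ofList pool := by
    rw [hU, pvOfList_eq_newOnes]
    have := pvEnumFilter pool []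
    simpa using this
  -- the target list: R = dedup (C ++ pool) = dedup C ++ new ones of pool
  set R : List String := PySem.Set.ofList (C ++ pool) with hR
  have hsplit : R = pvNewOnes C [] ++ pvNewOnes pool (PySem.Set.ofList C) := by
    rw [hR, PySem.Set.ofList_eq_foldl, List.foldl_append, ← PySem.Set.ofList_eq_foldl,
      pvFoldl_add, pvOfList_eq_newOnes]
  have hCsub : ∀ a : String, a ∈ C → a ∈ pool := by
    intro a ha
    rw [hC] at ha
    have := List.of_mem_filter ha
    simp only [Bool.and_eq_true] at this
    simpa [List.contains_eq_mem] using this.2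
  -- R is a permutation of U
  have hperm : R.Perm U := by
    rw [hUeq]
    refine (List.perm_ext_iff_of_nodup (PySem.Set.nodup_ofList _) (PySem.Set.nodup_ofList _)).mpr ?_
    intro a
    rw [PySem.Set.mem_ofList, PySem.Set.mem_ofList, List.mem_append]
    constructor
    · rintro (h | h)
      · exact hCsub a h
      · exact h
    · exact fun h => Or.inr h
  -- R is strictly increasing in B's rank
  set big := C.length with hbig
  set rank : String → Nat := fun u =>
    match PySem.List.index? C u with
    | some i => i
    | none => big + (PySem.List.index? U u).getD 0 with hrank
  have hrank_mem : ∀ a : String, a ∈ C → rank a = C.idxOf a := by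
    intro a ha
    rw [hrank]
    simp only [PySem.List.index?_eq_idxOf?, pvIdxOf?_of_mem C a ha]
  have hrank_not : ∀ a : String, a ∉ C → a ∈ pool → rank a = big + U.idxOf a := by
    intro a ha hp
    have haU : a ∈ U := by rw [hUeq, PySem.Set.mem_ofList]; exact hp
    rw [hrank]
    simp only [PySem.List.index?_eq_idxOf?, List.idxOf?_eq_none_iff.mpr ha,
      pvIdxOf?_of_mem U a haU, Option.getD_some]
  have hpair : R.Pairwise (fun a b => rank a < rank b) := by
    rw [hsplit, List.pairwise_append]
    refine ⟨?_, ?_, ?_⟩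
    · refine (pvNewOnes_pairwise_idxOf C []).imp_of_mem ?_
      intro a b ha hb hlt
      have haC : a ∈ C := (pvMem_newOnes C [] a ha).1
      have hbC : b ∈ C := (pvMem_newOnes C [] b hb).1
      rw [hrank_mem a haC, hrank_mem b hbC]; exact hlt
    · have hUno : U.Nodup := by rw [hUeq]; exact PySem.Set.nodup_ofList _
      have hfilt : pvNewOnes pool (PySem.Set.ofList C)
          = U.filter (fun x => !(List.contains (PySem.Set.ofList C) x)) := by
        rw [pvNewOnes_filter, hUeq, pvOfList_eq_newOnes pool]
      rw [hfilt]
      refine ((pvPairwise_idxOf_self U hUno).filter _).imp_of_mem ?_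
      intro a b ha hb hlt
      have haP : a ∉ C ∧ a ∈ pool := by
        have h1 := List.of_mem_filter ha
        have h2 : a ∈ U := List.mem_of_mem_filter ha
        simp [List.contains_eq_mem, PySem.Set.mem_ofList] at h1
        rw [hUeq, PySem.Set.mem_ofList] at h2
        exact ⟨h1, h2⟩
      have hbP : b ∉ C ∧ b ∈ pool := by
        have h1 := List.of_mem_filter hb
        have h2 : b ∈ U := List.mem_of_mem_filter hb
        simp [List.contains_eq_mem, PySem.Set.mem_ofList] at h1
        rw [hUeq, PySem.Set.mem_ofList] at h2
        exact ⟨h1, h2⟩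
      rw [hrank_not a haP.1 haP.2, hrank_not b hbP.1 hbP.2]
      omega
    · intro a ha b hb
      have haC : a ∈ C := (pvMem_newOnes C [] a ha).1
      have hb' := pvMem_newOnes pool (PySem.Set.ofList C) b hb
      have hbC : b ∉ C := fun h => hb'.2 ((PySem.Set.mem_ofList C b).mpr h)
      rw [hrank_mem a haC, hrank_not b hbC hb'.1, hbig]
      have := List.idxOf_lt_length_of_mem haC
      omega
  have hsorted : PySem.List.sorted U rank = R :=
    PySem.List.sorted_eq_of_perm_of_pairwise_lt U R rank hperm hpair
  rw [hsorted, hR, hpool]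

-- ===== VERDICT (by name: the statement is the Claim_ definition above) =====
theorem build_core_order_from_detected_py_spec : Claim_equal_build_core_order_from_detected_py := by
  intro detected_order extra_sections _
  exact build_core_order_from_detected_py_eq detected_order extra_sections
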